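-- pv_equiv track=rewrite | github.com/ristola/KiwiScan | vendor/ft8modem-sm/callsigns.py | build_sample
-- ===== SOURCE A (Python) =====
-- def build_sample(s):
-- 	result = 1
-- 	for ch in s:
-- 		result <<= 1
-- 		if ch.isalpha():
-- 			result |= 1
-- 		elif not ch.isdigit():
-- 			return 0
-- 	return result
-- ===== SOURCE B (Python) =====
-- def build_sample(s):
--     if not all(ch.isalpha() or ch.isdigit() for ch in s):
--         return 0
--     bits = '1' + ''.join('1' if ch.isalpha() else '0' for ch in s)
--     return int(bits, 2)
-- ===== Notes on version B (the rewrite author's own statement) =====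
-- stated objective: faster
-- what changed: Replaces the single-pass bit-shift accumulator with early return by a whole-string validation pass followed by constructing a binary digit string and parsing it with int(bits, 2); A's n bigint shift-and-or updates cost quadratic bit-work while int(bits,2) builds the number once.
import Mathlib
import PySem

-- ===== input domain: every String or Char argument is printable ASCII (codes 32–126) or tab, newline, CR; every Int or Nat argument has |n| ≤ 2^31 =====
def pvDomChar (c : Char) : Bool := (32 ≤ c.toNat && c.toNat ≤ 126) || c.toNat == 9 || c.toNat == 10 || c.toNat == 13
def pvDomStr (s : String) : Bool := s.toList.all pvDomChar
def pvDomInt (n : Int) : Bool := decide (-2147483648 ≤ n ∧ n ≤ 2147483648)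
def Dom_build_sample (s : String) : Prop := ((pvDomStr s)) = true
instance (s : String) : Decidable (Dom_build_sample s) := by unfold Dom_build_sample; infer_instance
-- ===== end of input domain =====

-- B validates the whole string first, then builds a binary digit string and parses it (same values as A).


-- ===== PORT A =====
-- loop with early return: 'result <<= 1' is 'acc * 2'; 'result |= 1' on the even shifted value is '+ 1'
def buildSampleGo (acc : Int) (cs : List Char) : Int :=
  match cs with
  | [] => acc
  | c :: rest =>
    let r := acc * 2
    if PySem.Chars.isalpha c then buildSampleGo (r + 1) rest
    else if ¬ PySem.Chars.isdigit c then 0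
    else buildSampleGo r rest

def build_sample (s : String) : Int := buildSampleGo 1 s.toList

-- ===== PORT B =====
-- int(bits, 2) ported by hand as a base-2 fold over the digit characters (exact: bits holds only '0'/'1')
def parseBin (bits : List Char) : Int :=
  bits.foldl (fun a c => 2 * a + (if c = '1' then 1 else 0)) 0

def build_sample_alt (s : String) : Int :=
  if ¬ (s.toList.all (fun ch => PySem.Chars.isalpha ch || PySem.Chars.isdigit ch)) then 0
  else parseBin ('1' :: s.toList.map (fun ch => if PySem.Chars.isalpha ch then '1' else '0'))

-- ===== PRECONDITION & SPEC =====
def Spec_build_sample (s : String) (out : Int) : Prop := out = build_sample_alt s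
instance (s : String) (out : Int) : Decidable (Spec_build_sample s out) := by unfold Spec_build_sample; infer_instance

-- ===== CLAIM (what is proved, stated in full; the proofs are below) =====
def Claim_equal_build_sample : Prop := ∀ (s : String), Dom_build_sample s → Spec_build_sample s (build_sample s)

-- ===== LEMMAS AND PROOFS =====
theorem buildSampleGo_eq (cs : List Char) : ∀ (acc : Int),
    buildSampleGo acc cs =
      if cs.all (fun ch => PySem.Chars.isalpha ch || PySem.Chars.isdigit ch) then
        cs.foldl (fun a c => 2 * a + (if PySem.Chars.isalpha c then 1 else 0)) acc
      else 0 := by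
  induction cs with
  | nil => intro acc; simp [buildSampleGo]
  | cons c rest ih =>
    intro acc
    by_cases ha : PySem.Chars.isalpha c = true
    · simp [buildSampleGo, ha, ih]
      ring_nf
    · by_cases hd : PySem.Chars.isdigit c = true
      · simp [buildSampleGo, ha, hd, ih]
        ring_nf
      · simp [buildSampleGo, ha, hd]

theorem parseBin_map (cs : List Char) :
    parseBin ('1' :: cs.map (fun ch => if PySem.Chars.isalpha ch then '1' else '0')) =
      cs.foldl (fun a c => 2 * a + (if PySem.Chars.isalpha c then 1 else 0)) 1 := by
  simp only [parseBin, List.foldl_cons, List.foldl_map]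
  norm_num
  apply PySem.List.foldl_congr_mem
  intro a c _
  by_cases h : PySem.Chars.isalpha c = true <;> simp [h]

-- ===== VERDICT (by name: the statement is the Claim_ definition above) =====
theorem build_sample_spec : Claim_equal_build_sample := by
  intro s _
  unfold Spec_build_sample build_sample build_sample_alt
  rw [buildSampleGo_eq, parseBin_map]
  by_cases h : s.toList.all (fun ch => PySem.Chars.isalpha ch || PySem.Chars.isdigit ch) = true <;> simp [h]
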